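-- pv_equiv track=rewrite | github.com/ksamaarora/vCISO | vciso-backend/app/services/gap_analyzer.py | _extract_plan_sections
-- ===== SOURCE A (Python) =====
-- from typing import List, Dict, Any
--
-- def _extract_plan_sections(plan_markdown: str) -> Dict[str, str]:
--     """Extract sections from Markdown plan (naive implementation)"""
--     sections = {}
--     current_section = None
--     current_content = []
--
--     for line in plan_markdown.split("\n"):
--         # Check if line is a header (starts with ##)
--         if line.startswith("## "):
--             # Save previous section
--             if current_section:
--                 sections[current_section] = "\n".join(current_content)
--
--             # Start new section
--             current_section = line.replace("##", "").strip()
--             current_content = []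
--         else:
--             if current_section:
--                 current_content.append(line)
--
--     # Save last section
--     if current_section:
--         sections[current_section] = "\n".join(current_content)
--
--     return sections
-- ===== SOURCE B (Python) =====
-- def _extract_plan_sections(plan_markdown: str):
--     """Locate all markdown header lines first, then slice the content between
--     consecutive headers; skips headers whose name strips to empty while
--     still letting them act as boundaries (as in A)."""
--     lines = plan_markdown.split("\n")
--     header_idxs = [i for i, line in enumerate(lines) if line.startswith("## ")]
--     sections = {}
--     for k, i in enumerate(header_idxs):
--         name = lines[i].replace("##", "").strip()
--         if name:
--             end = header_idxs[k + 1] if k + 1 < len(header_idxs) else len(lines)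
--             sections[name] = "\n".join(lines[i + 1:end])
--     return sections
-- ===== Notes on version B (the rewrite author's own statement) =====
-- stated objective: alternative
-- what changed: Replaces A's stateful line-by-line accumulation (current section + growing content buffer) with a two-phase decomposition: first collect the indices of all header lines, then slice the lines between consecutive header indices and join each slice as that section's content.
import Mathlib
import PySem

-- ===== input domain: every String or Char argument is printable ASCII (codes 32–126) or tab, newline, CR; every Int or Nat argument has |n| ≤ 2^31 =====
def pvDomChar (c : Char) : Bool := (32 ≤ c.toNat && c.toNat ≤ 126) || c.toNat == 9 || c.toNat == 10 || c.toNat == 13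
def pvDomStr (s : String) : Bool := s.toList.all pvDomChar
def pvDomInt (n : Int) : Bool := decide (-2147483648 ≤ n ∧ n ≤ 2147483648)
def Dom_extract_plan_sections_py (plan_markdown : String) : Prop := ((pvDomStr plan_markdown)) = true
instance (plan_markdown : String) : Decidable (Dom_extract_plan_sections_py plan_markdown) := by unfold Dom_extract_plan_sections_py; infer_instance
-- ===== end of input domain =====

-- B replaces A's stateful line-by-line accumulator with a locate-the-headers-then-slice-between-them
-- decomposition (same cost, different structure); return values proved equal on all inputs.

-- ===== PORT A =====
-- helpers shared verbatim by both Pythons: the header test and the name computation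
def pvIsH (line : String) : Bool := PySem.Str.startswith line "## "
def pvNameOf (line : String) : String := PySem.Str.strip (PySem.Str.replace line "##" "")
-- Python truthiness of current_section (None or a string): true iff a nonempty string
def pvTruthy (o : Option String) : Bool := o.getD "" != ""
-- "if current_section: sections[current_section] = '\n'.join(current_content)"
def pvFlush (d : PySem.Dict String String) (cur : Option String) (content : List String) :
    PySem.Dict String String :=
  if pvTruthy cur then d.insert (cur.getD "") (PySem.Str.join "\n" content) else d
-- one iteration of A's for-loop over the lines
def pvStepA (st : PySem.Dict String String × Option String × List String) (line : String) :
    PySem.Dict String String × Option String × List String :=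
  if pvIsH line then (pvFlush st.1 st.2.1 st.2.2, some (pvNameOf line), ([] : List String))
  else if pvTruthy st.2.1 then (st.1, st.2.1, st.2.2 ++ [line]) else st

def extract_plan_sections_py (plan_markdown : String) : List (String × String) :=
  let lines := (PySem.Str.split? plan_markdown "\n").getD []
  let st := lines.foldl pvStepA (PySem.Dict.empty, none, ([] : List String))
  (pvFlush st.1 st.2.1 st.2.2).items

-- ===== PORT B =====
-- "[i for i, line in enumerate(lines) if line.startswith('## ')]"; the getD default is never
-- read since every i < lines.length
def pvHeaders (lines : List String) : List Nat :=
  (List.range lines.length).filter (fun i => pvIsH (lines.getD i ""))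
-- B's for-loop over the header indices; lines[i+1:end] is exact as drop/take on these
-- in-range natural indices (PySem.List.slice_natCast)
def pvBGo (lines : List String) : List Nat → PySem.Dict String String → PySem.Dict String String
  | [], d => d
  | i :: rest, d =>
      let name := pvNameOf (lines.getD i "")
      let d' := if name ≠ "" then
          let e := rest.headD lines.length
          d.insert name (PySem.Str.join "\n" ((lines.drop (i+1)).take (e - (i+1))))
        else d
      pvBGo lines rest d'

def extract_plan_sections_py_alt (plan_markdown : String) : List (String × String) :=
  let lines := (PySem.Str.split? plan_markdown "\n").getD []
  (pvBGo lines (pvHeaders lines) PySem.Dict.empty).items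

-- ===== PRECONDITION & SPEC =====
def Spec_extract_plan_sections_py (plan_markdown : String) (out : List (String × String)) : Prop := out = extract_plan_sections_py_alt plan_markdown
instance (plan_markdown : String) (out : List (String × String)) : Decidable (Spec_extract_plan_sections_py plan_markdown out) := by unfold Spec_extract_plan_sections_py; infer_instance

-- ===== CLAIM (what is proved, stated in full; the proofs are below) =====
def Claim_equal_extract_plan_sections_py : Prop := ∀ (plan_markdown : String), Dom_extract_plan_sections_py plan_markdown → Spec_extract_plan_sections_py plan_markdown (extract_plan_sections_py plan_markdown)

-- ===== LEMMAS AND PROOFS =====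

theorem pvFlush_falsy (d : PySem.Dict String String) (cur : Option String)
    (content : List String) (h : pvTruthy cur = false) : pvFlush d cur content = d := by
  simp [pvFlush, h]

theorem pvBGo_shift (x : String) (ls : List String) :
    ∀ (idxs : List Nat) (d : PySem.Dict String String),
      pvBGo (x :: ls) (idxs.map (· + 1)) d = pvBGo ls idxs d := by
  intro idxs
  induction idxs with
  | nil => intro d; rfl
  | cons i rest ih =>
      intro d
      have he : ((rest.map (· + 1)).headD ((x :: ls).length)) = rest.headD ls.length + 1 := by
        cases rest <;> simp
      simp only [List.map_cons, pvBGo, List.getD_cons_succ, he]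
      have hdrop : (x :: ls).drop (i + 1 + 1) = ls.drop (i + 1) := rfl
      have harith : rest.headD ls.length + 1 - (i + 1 + 1) = rest.headD ls.length - (i + 1) := by
        omega
      rw [hdrop, harith, ih]

theorem pvHeaders_cons (x : String) (ls : List String) :
    pvHeaders (x :: ls) = (if pvIsH x then [0] else []) ++ (pvHeaders ls).map (· + 1) := by
  simp only [pvHeaders, List.length_cons, List.range_succ_eq_map, List.filter_cons,
    List.getD_cons_zero, List.filter_map]
  cases h : pvIsH x <;>
    simp [Function.comp_def, Nat.succ_eq_add_one]

theorem pvHeaders_cons_true (x : String) (ls : List String) (hx : pvIsH x = true) :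
    pvHeaders (x :: ls) = 0 :: (pvHeaders ls).map (· + 1) := by
  rw [pvHeaders_cons, hx]; rfl

theorem pvHeaders_cons_false (x : String) (ls : List String) (hx : pvIsH x = false) :
    pvHeaders (x :: ls) = (pvHeaders ls).map (· + 1) := by
  rw [pvHeaders_cons, hx]; rfl

theorem headD_map_succ (h : List Nat) (n : Nat) :
    (h.map (· + 1)).headD (n + 1) = h.headD n + 1 := by
  cases h <;> simp

theorem pvMain : ∀ (ls : List String) (d : PySem.Dict String String) (cur : Option String)
    (content : List String),
    (let st := ls.foldl pvStepA (d, cur, content); pvFlush st.1 st.2.1 st.2.2)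
      = pvBGo ls (pvHeaders ls)
          (pvFlush d cur (content ++ ls.take ((pvHeaders ls).headD ls.length))) := by
  intro ls
  induction ls with
  | nil => intro d cur content; simp [pvHeaders, pvBGo]
  | cons x ls ih =>
      intro d cur content
      cases hx : pvIsH x with
      | true =>
          rw [pvHeaders_cons_true x ls hx]
          have hstep : pvStepA (d, cur, content) x
              = (pvFlush d cur content, some (pvNameOf x), ([] : List String)) := by
            simp [pvStepA, hx]
          simp only [List.foldl_cons, hstep]
          rw [ih]
          simp only [List.headD_cons, List.take_zero, List.append_nil, List.nil_append, pvBGo,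
            List.getD_cons_zero, List.length_cons, List.drop_succ_cons, List.drop_zero]
          rw [headD_map_succ _ ls.length, pvBGo_shift]
          have harith : (pvHeaders ls).headD ls.length + 1 - (0 + 1)
              = (pvHeaders ls).headD ls.length := by omega
          rw [harith]
          by_cases hn : pvNameOf x = ""
          · simp [pvFlush, pvTruthy, hn]
          · simp [pvFlush, pvTruthy, hn]
      | false =>
          rw [pvHeaders_cons_false x ls hx]
          simp only [List.length_cons]
          rw [headD_map_succ _ ls.length, pvBGo_shift]
          cases hc : pvTruthy cur with
          | true =>
              have hstep : pvStepA (d, cur, content) x = (d, cur, content ++ [x]) := by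
                simp [pvStepA, hx, hc]
              simp only [List.foldl_cons, hstep]
              rw [ih]
              have htake : List.take ((pvHeaders ls).headD ls.length + 1) (x :: ls)
                  = x :: List.take ((pvHeaders ls).headD ls.length) ls := rfl
              rw [htake]
              simp only [List.append_assoc, List.singleton_append]
          | false =>
              have hstep : pvStepA (d, cur, content) x = (d, cur, content) := by
                simp [pvStepA, hx, hc]
              simp only [List.foldl_cons, hstep]
              rw [ih]
              rw [pvFlush_falsy _ _ _ hc, pvFlush_falsy _ _ _ hc]

theorem pvPorts_eq (plan_markdown : String) :
    extract_plan_sections_py plan_markdown = extract_plan_sections_py_alt plan_markdown := by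
  have h := pvMain ((PySem.Str.split? plan_markdown "\n").getD []) PySem.Dict.empty none []
  simp only [List.nil_append] at h
  rw [pvFlush_falsy PySem.Dict.empty none _ rfl] at h
  exact congrArg PySem.Dict.items h

-- ===== VERDICT (by name: the statement is the Claim_ definition above) =====
theorem extract_plan_sections_py_spec : Claim_equal_extract_plan_sections_py :=
  fun plan_markdown _ => pvPorts_eq plan_markdown
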